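-- pv_equiv track=rewrite | github.com/collinsakenga/codewars_solutions | 6 kyu/Can you win the codewar.py | codewar_result
-- ===== SOURCE A (Python) =====
-- def codewar_result(codewarrior, opponent):
--     codewarrior = sorted(codewarrior)
--     dict = {"win": 0, "draw": 0, "lose": 0}
--     while codewarrior:
--         temp = codewarrior[0]
--         temp2 = max(opponent)
--         flag = False
--         for i in opponent:
--             if temp > i:
--                 flag = True
--                 temp2 = min(temp2, i)
--         if flag:
--             codewarrior = codewarrior[1:]
--             opponent.remove(temp2)
--             dict["win"] += 1
--         else:
--             if max(codewarrior) > max(opponent):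
--                 codewarrior.remove(max(codewarrior))
--                 opponent.remove(max(opponent))
--                 dict["win"] += 1
--             elif temp == temp2:
--                 codewarrior = codewarrior[1:]
--                 opponent.remove(temp2)
--                 dict["draw"] += 1
--             else:
--                 codewarrior = codewarrior[1:]
--                 opponent.remove(temp2)
--                 dict["lose"] += 1
--     if dict["win"] > dict["lose"]:
--         return 'Victory'
--     elif dict["lose"] > dict["win"]:
--         return "Defeat"
--     return 'Stalemate'
-- ===== SOURCE B (Python) =====
-- from collections import deque
--
-- def codewar_result(codewarrior, opponent):
--     # Single greedy pass over both sorted hands via double-ended pointers.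
--     # Note: unlike A, this does not mutate `opponent` in place.
--     cw = deque(sorted(codewarrior))
--     opp = deque(sorted(opponent))
--     wins = draws = losses = 0
--     while cw:
--         if opp[0] < cw[0]:
--             cw.popleft(); opp.popleft(); wins += 1
--         elif cw[-1] > opp[-1]:
--             cw.pop(); opp.pop(); wins += 1
--         elif cw[0] == opp[-1]:
--             cw.popleft(); opp.pop(); draws += 1
--         else:
--             cw.popleft(); opp.pop(); losses += 1
--     if wins > losses:
--         return 'Victory'
--     if losses > wins:
--         return 'Defeat'
--     return 'Stalemate'
-- ===== Notes on version B (the rewrite author's own statement) =====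
-- stated objective: faster
-- what changed: Replaced the O(n^2) simulation (repeated max/min scans and list.remove on the opponent hand each round) by a single greedy pass over both hands sorted once, using front/back double-ended pointers (deques), so each round is O(1); unlike A, B does not mutate `opponent` in place (return-value equivalence only).
import Mathlib
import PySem

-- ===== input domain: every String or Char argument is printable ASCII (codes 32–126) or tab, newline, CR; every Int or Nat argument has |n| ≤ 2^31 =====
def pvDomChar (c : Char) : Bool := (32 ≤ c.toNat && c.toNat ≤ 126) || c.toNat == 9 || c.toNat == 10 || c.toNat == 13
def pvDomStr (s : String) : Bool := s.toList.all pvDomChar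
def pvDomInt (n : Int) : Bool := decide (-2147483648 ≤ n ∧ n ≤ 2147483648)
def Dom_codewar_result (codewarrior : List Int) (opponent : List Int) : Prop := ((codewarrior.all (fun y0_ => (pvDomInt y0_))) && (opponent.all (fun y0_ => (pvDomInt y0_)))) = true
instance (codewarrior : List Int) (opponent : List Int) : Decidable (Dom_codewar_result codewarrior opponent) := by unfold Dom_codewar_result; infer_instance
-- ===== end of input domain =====

-- B replaces A's quadratic rescan-and-remove simulation by one greedy pass over both
-- hands sorted once, with front/back double-ended pointers (objective: faster).
-- A mutates `opponent` in place (list.remove); B does not — the equivalence proved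
-- here is about the return value only.

-- ===== PORT A =====
-- the inner 'for i in opponent' loop of A, accumulating (flag, temp2)
def pvFT (temp : Int) (opp : List Int) (st : Bool × Int) : Bool × Int :=
  opp.foldl (fun st i => if temp > i then (true, min st.2 i) else st) st

-- the while-loop of A; each round removes exactly one codewarrior card, so the
-- loop runs exactly len(codewarrior) times: that length is passed as structural fuel.
-- The dict of counters is carried as a PySem.Dict.
def pvALoop : Nat → List Int → List Int → PySem.Dict String Int → PySem.Dict String Int
  | _, [], _, d => d
  | 0, _ :: _, _, d => d   -- unreachable: the fuel is the length of the hand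
  | fuel + 1, temp :: rest, opp, d =>
    match PySem.List.max? opp (fun x => x) with
    | none => d   -- Python: max() of empty sequence raises ValueError (excluded by Pre_)
    | some m0 =>
      let ft := pvFT temp opp (false, m0)
      if ft.1 then
        match PySem.List.remove? opp ft.2 with
        | none => d   -- unreachable: temp2 ∈ opponent
        | some opp' =>
          pvALoop fuel (PySem.List.slice (temp :: rest) (some 1) none) opp'
            (d.insert "win" (d.getD "win" 0 + 1))
      else
        match PySem.List.max? (temp :: rest) (fun x => x),
              PySem.List.max? opp (fun x => x) with
        | some mc, some mo =>
          if mc > mo then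
            match PySem.List.remove? (temp :: rest) mc,
                  PySem.List.remove? opp mo with
            | some cw', some opp' =>
              pvALoop fuel cw' opp' (d.insert "win" (d.getD "win" 0 + 1))
            | _, _ => d   -- unreachable: max belongs to its list
          else if temp = ft.2 then
            match PySem.List.remove? opp ft.2 with
            | none => d   -- unreachable
            | some opp' =>
              pvALoop fuel (PySem.List.slice (temp :: rest) (some 1) none) opp'
                (d.insert "draw" (d.getD "draw" 0 + 1))
          else
            match PySem.List.remove? opp ft.2 with
            | none => d   -- unreachable
            | some opp' =>
              pvALoop fuel (PySem.List.slice (temp :: rest) (some 1) none) opp'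
                (d.insert "lose" (d.getD "lose" 0 + 1))
        | _, _ => d   -- unreachable: both lists nonempty here

def codewar_result (codewarrior : List Int) (opponent : List Int) : String :=
  let cw := PySem.List.sorted codewarrior (fun x => x) false
  let d := PySem.Dict.ofList [("win", (0 : Int)), ("draw", 0), ("lose", 0)]
  let d' := pvALoop cw.length cw opponent d
  if d'.getD "win" 0 > d'.getD "lose" 0 then "Victory"
  else if d'.getD "lose" 0 > d'.getD "win" 0 then "Defeat"
  else "Stalemate"

-- ===== PORT B =====
-- the while-loop of B over the two sorted deques (front = head, back = getLast)
def pvBLoop (cw opp : List Int) (w d l : Int) : Int × Int × Int :=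
  match cw, opp with
  | [], _ => (w, d, l)
  | _ :: _, [] => (w, d, l)   -- Python: opp[0] raises IndexError (excluded by Pre_)
  | c0 :: ct, o0 :: ot =>
    if o0 < c0 then pvBLoop ct ot (w + 1) d l
    else if (c0 :: ct).getLast (by simp) > (o0 :: ot).getLast (by simp) then
      pvBLoop (c0 :: ct).dropLast (o0 :: ot).dropLast (w + 1) d l
    else if c0 = (o0 :: ot).getLast (by simp) then
      pvBLoop ct (o0 :: ot).dropLast w (d + 1) l
    else
      pvBLoop ct (o0 :: ot).dropLast w d (l + 1)
termination_by cw.length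
decreasing_by all_goals simp

def codewar_result_alt (codewarrior : List Int) (opponent : List Int) : String :=
  let r := pvBLoop (PySem.List.sorted codewarrior (fun x => x) false)
                   (PySem.List.sorted opponent (fun x => x) false) 0 0 0
  if r.1 > r.2.2 then "Victory"
  else if r.2.2 > r.1 then "Defeat"
  else "Stalemate"

-- ===== PRECONDITION & SPEC =====
-- Pre_ excludes exactly the inputs where A raises: with more codewarrior cards than
-- opponent cards the loop empties `opponent` and `max(opponent)` raises ValueError.
def Pre_codewar_result (codewarrior : List Int) (opponent : List Int) : Prop :=
  codewarrior.length ≤ opponent.length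
instance (codewarrior : List Int) (opponent : List Int) : Decidable (Pre_codewar_result codewarrior opponent) := by unfold Pre_codewar_result; infer_instance

def pvWitness_codewar_result : List Int × List Int := ([2, 4, 1], [5, 3, 2])

def Spec_codewar_result (codewarrior : List Int) (opponent : List Int) (out : String) : Prop := out = codewar_result_alt codewarrior opponent
instance (codewarrior : List Int) (opponent : List Int) (out : String) : Decidable (Spec_codewar_result codewarrior opponent out) := by unfold Spec_codewar_result; infer_instance

-- ===== CLAIM (what is proved, stated in full; the proofs are below) =====
def Claim_equal_codewar_result : Prop := ∀ (codewarrior : List Int) (opponent : List Int), Dom_codewar_result codewarrior opponent → Pre_codewar_result codewarrior opponent → Spec_codewar_result codewarrior opponent (codewar_result codewarrior opponent)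

-- ===== LEMMAS AND PROOFS =====

-- helper constructor for the counter dict (proof-side only)
def pvMkD (w d l : Int) : PySem.Dict String Int :=
  PySem.Dict.ofList [("win", w), ("draw", d), ("lose", l)]

theorem pvMkD_win (w d l : Int) :
    (pvMkD w d l).insert "win" ((pvMkD w d l).getD "win" 0 + 1) = pvMkD (w + 1) d l := rfl

theorem pvMkD_draw (w d l : Int) :
    (pvMkD w d l).insert "draw" ((pvMkD w d l).getD "draw" 0 + 1) = pvMkD w (d + 1) l := rfl

theorem pvMkD_lose (w d l : Int) :
    (pvMkD w d l).insert "lose" ((pvMkD w d l).getD "lose" 0 + 1) = pvMkD w d (l + 1) := rfl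

theorem pvMkD_getD_win (w d l : Int) : (pvMkD w d l).getD "win" 0 = w := rfl
theorem pvMkD_getD_lose (w d l : Int) : (pvMkD w d l).getD "lose" 0 = l := rfl

theorem pv_le_getLast {l : List Int} (h : l.Pairwise (· ≤ ·)) (hne : l ≠ []) :
    ∀ x ∈ l, x ≤ l.getLast hne := by
  induction l with
  | nil => simp
  | cons a t ih =>
    intro x hx
    cases t with
    | nil =>
      simp only [List.mem_singleton] at hx
      simp [hx]
    | cons b u =>
      rw [List.getLast_cons (by simp)]
      rcases List.mem_cons.mp hx with rfl | hx'
      · exact le_trans (List.rel_of_pairwise_cons h (List.getLast_mem (by simp))) (le_refl _)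
      · exact ih (List.pairwise_cons.mp h).2 (by simp) x hx'

theorem pv_max_eq {opp oppS : List Int} {m0 : Int} (hperm : oppS.Perm opp)
    (hs : oppS.Pairwise (· ≤ ·)) (hne : oppS ≠ [])
    (hm : PySem.List.max? opp (fun x => x) = some m0) :
    m0 = oppS.getLast hne := by
  have hmem : m0 ∈ oppS := hperm.mem_iff.mpr (PySem.List.max?_mem hm)
  have h1 : m0 ≤ oppS.getLast hne := pv_le_getLast hs hne m0 hmem
  have h2 : oppS.getLast hne ≤ m0 :=
    PySem.List.max?_isMax hm _ (hperm.mem_iff.mp (List.getLast_mem hne))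
  omega

theorem pvFT_fst (temp : Int) : ∀ (opp : List Int) (st : Bool × Int),
    (pvFT temp opp st).1 = (st.1 || opp.any (fun i => decide (i < temp))) := by
  intro opp
  induction opp with
  | nil => intro st; simp [pvFT]
  | cons x t ih =>
    intro st
    by_cases hx : temp > x
    · simp only [pvFT, List.foldl_cons, if_pos hx, List.any_cons]
      simp only [pvFT] at ih
      rw [ih]
      simp [show decide (x < temp) = true by simp [hx]]
    · simp only [pvFT, List.foldl_cons, if_neg hx, List.any_cons]
      simp only [pvFT] at ih
      rw [ih]
      simp only [show decide (x < temp) = false by simp; omega, Bool.false_or]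
  
theorem pvFT_snd (temp : Int) : ∀ (opp : List Int) (st : Bool × Int),
    (pvFT temp opp st).2 = (opp.filter (fun i => decide (i < temp))).foldl min st.2 := by
  intro opp
  induction opp with
  | nil => intro st; simp [pvFT]
  | cons x t ih =>
    intro st
    by_cases hx : temp > x
    · simp only [pvFT, List.foldl_cons, if_pos hx]
      simp only [pvFT] at ih
      rw [ih]
      rw [List.filter_cons_of_pos (by simp [hx])]
      simp [List.foldl_cons]
    · simp only [pvFT, List.foldl_cons, if_neg hx]
      simp only [pvFT] at ih
      rw [ih]
      rw [List.filter_cons_of_neg (by simp; omega)]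

theorem pv_foldl_min_eq : ∀ (l : List Int) (a m : Int), m ≤ a → (∀ x ∈ l, m ≤ x) →
    (m ∈ l ∨ m = a) → l.foldl min a = m := by
  intro l
  induction l with
  | nil =>
    intro a m _ _ hm
    rcases hm with h | h
    · simp at h
    · simp [h]
  | cons x t ih =>
    intro a m ham hall hm
    simp only [List.foldl_cons]
    apply ih
    · exact le_min ham (hall x (by simp))
    · intro y hy; exact hall y (by simp [hy])
    · rcases hm with h | h
      · rcases List.mem_cons.mp h with rfl | h'
        · right; exact (min_eq_right ham).symm
        · left; exact h'
      · right; subst h; exact (min_eq_left (hall x (by simp))).symm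

theorem pv_perm_erase_getLast (l : List Int) (hne : l ≠ []) :
    (l.erase (l.getLast hne)).Perm l.dropLast := by
  have h1 : l.Perm (l.getLast hne :: l.dropLast) := by
    conv_lhs => rw [← List.dropLast_append_getLast hne]
    exact List.perm_append_singleton _ _
  have h2 := h1.erase (l.getLast hne)
  simpa [List.erase_cons_head] using h2

theorem pv_sorted_erase_getLast {l : List Int} (h : l.Pairwise (· ≤ ·)) (hne : l ≠ []) :
    l.erase (l.getLast hne) = l.dropLast := by
  have hperm := pv_perm_erase_getLast l hne
  have h1 : (l.erase (l.getLast hne)).Pairwise (· ≤ ·) :=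
    List.Pairwise.sublist List.erase_sublist h
  have h2 : l.dropLast.Pairwise (· ≤ ·) :=
    List.Pairwise.sublist (List.dropLast_sublist l) h
  exact List.Perm.eq_of_pairwise (fun a b _ _ hab hba => le_antisymm hab hba) h1 h2 hperm

theorem pv_loop_eq (n : Nat) : ∀ (cw opp oppS : List Int) (w d l : Int),
    cw.length = n → cw.Pairwise (· ≤ ·) → oppS.Perm opp → oppS.Pairwise (· ≤ ·) →
    cw.length ≤ opp.length →
    pvALoop n cw opp (pvMkD w d l) =
      pvMkD (pvBLoop cw oppS w d l).1 (pvBLoop cw oppS w d l).2.1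
        (pvBLoop cw oppS w d l).2.2 := by
  induction n with
  | zero =>
    intro cw opp oppS w d l hlen _ _ _ _
    have hcw : cw = [] := List.length_eq_zero_iff.mp hlen
    subst hcw
    rw [pvBLoop]
    simp only [pvALoop]
  | succ n ih =>
    intro cw opp oppS w d l hlen hcs hperm hos hle
    obtain ⟨temp, rest, rfl⟩ : ∃ a t, cw = a :: t := by
      cases cw with
      | nil => simp at hlen
      | cons a t => exact ⟨a, t, rfl⟩
    have hoppne : opp ≠ [] := by
      intro h; subst h; simp at hle
    obtain ⟨o0, ot, rfl⟩ : ∃ a t, oppS = a :: t := by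
      cases oppS with
      | nil => exact absurd hperm.nil_eq.symm hoppne
      | cons a t => exact ⟨a, t, rfl⟩
    have hneS : (o0 :: ot) ≠ ([] : List Int) := by simp
    cases hm : PySem.List.max? opp (fun x => x) with
    | none => exact absurd ((PySem.List.max?_eq_none_iff _ _).mp hm) hoppne
    | some m0 =>
    have hM : m0 = (o0 :: ot).getLast hneS := pv_max_eq hperm hos hneS hm
    have ho0min : ∀ x ∈ opp, o0 ≤ x := by
      intro x hx
      rcases List.mem_cons.mp (hperm.mem_iff.mpr hx) with rfl | hx'
      · exact le_refl _
      · exact List.rel_of_pairwise_cons hos hx'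
    have ho0opp : o0 ∈ opp := hperm.mem_iff.mp (by simp)
    have hm0opp : m0 ∈ opp := PySem.List.max?_mem hm
    have ho0m0 : o0 ≤ m0 := ho0min m0 hm0opp
    have hrestlen : rest.length = n := by simpa using hlen
    have hoplen : n + 1 ≤ opp.length := by simpa [hrestlen] using hle
    have hcs' : rest.Pairwise (· ≤ ·) := (List.pairwise_cons.mp hcs).2
    have hos' : ot.Pairwise (· ≤ ·) := (List.pairwise_cons.mp hos).2
    simp only [pvALoop]
    simp only [hm]
    rw [pvBLoop.eq_def]
    simp only []
    have hfst : (pvFT temp opp (false, m0)).1 = opp.any (fun i => decide (i < temp)) := by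
      rw [pvFT_fst]; simp
    have hsnd : (pvFT temp opp (false, m0)).2
        = (opp.filter (fun i => decide (i < temp))).foldl min m0 := by
      rw [pvFT_snd]
    by_cases hflag : o0 < temp
    · -- win via a smaller opponent card: temp2 = o0 = min(opp)
      have hany : opp.any (fun i => decide (i < temp)) = true :=
        List.any_eq_true.mpr ⟨o0, ho0opp, by simpa using hflag⟩
      have htemp2 : (pvFT temp opp (false, m0)).2 = o0 := by
        rw [hsnd]
        apply pv_foldl_min_eq _ _ _ ho0m0
        · intro x hx
          exact ho0min x (List.mem_of_mem_filter hx)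
        · left
          exact List.mem_filter.mpr ⟨ho0opp, by simpa using hflag⟩
      rw [hfst, hany]
      simp only [if_true]
      rw [htemp2, PySem.List.remove?_eq_some_erase opp o0 ho0opp]
      simp only []
      rw [PySem.List.slice_from_one]
      simp only [List.tail_cons]
      rw [pvMkD_win]
      rw [if_pos hflag]
      refine ih rest (opp.erase o0) ot (w + 1) d l hrestlen hcs' ?_ hos'
        (by rw [List.length_erase_of_mem ho0opp]; omega)
      have h1 : ((o0 :: ot).erase o0).Perm (opp.erase o0) := hperm.erase o0
      simpa using h1
    · -- no opponent card is smaller than temp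
      have hany : opp.any (fun i => decide (i < temp)) = false := by
        rw [List.any_eq_false]
        intro x hx
        simp only [decide_eq_true_eq]
        have := ho0min x hx
        omega
      have hfilt : opp.filter (fun i => decide (i < temp)) = [] := by
        rw [List.filter_eq_nil_iff]
        intro x hx
        simp only [decide_eq_true_eq]
        have := ho0min x hx
        omega
      have htemp2 : (pvFT temp opp (false, m0)).2 = m0 := by
        rw [hsnd, hfilt]; rfl
      rw [hfst, hany]
      simp only [Bool.false_eq_true, if_false]
      cases hmc : PySem.List.max? (temp :: rest) (fun x => x) with
      | none => exact absurd ((PySem.List.max?_eq_none_iff _ _).mp hmc) (by simp)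
      | some mc =>
      simp only [hmc]
      have hneC : (temp :: rest) ≠ ([] : List Int) := by simp
      have hC : mc = (temp :: rest).getLast hneC :=
        pv_max_eq (List.Perm.refl _) hcs hneC hmc
      rw [if_neg hflag]
      by_cases hwin2 : mc > m0
      · -- both maxima removed, win
        rw [if_pos hwin2]
        have hmcmem : mc ∈ (temp :: rest) := PySem.List.max?_mem hmc
        rw [PySem.List.remove?_eq_some_erase _ mc hmcmem,
          PySem.List.remove?_eq_some_erase _ m0 hm0opp]
        simp only []
        rw [pvMkD_win]
        have hBgt : (temp :: rest).getLast hneC > (o0 :: ot).getLast hneS := by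
          rw [← hC, ← hM]; exact hwin2
        rw [if_pos hBgt]
        have hce : (temp :: rest).erase mc = (temp :: rest).dropLast := by
          rw [hC]; exact pv_sorted_erase_getLast hcs hneC
        have hoe : ((o0 :: ot).dropLast).Perm (opp.erase m0) := by
          have h1 := (pv_perm_erase_getLast (o0 :: ot) hneS).symm
          rw [← hM] at h1
          exact h1.trans (hperm.erase m0)
        rw [hce]
        exact ih ((temp :: rest).dropLast) (opp.erase m0) ((o0 :: ot).dropLast)
          (w + 1) d l
          (by simp [hrestlen])
          (List.Pairwise.sublist (List.dropLast_sublist _) hcs)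
          hoe
          (List.Pairwise.sublist (List.dropLast_sublist _) hos)
          (by
            rw [List.length_erase_of_mem hm0opp]
            simp only [List.length_dropLast, List.length_cons]
            omega)
      · rw [if_neg hwin2]
        have hBgt : ¬((temp :: rest).getLast hneC > (o0 :: ot).getLast hneS) := by
          rw [← hC, ← hM]; exact hwin2
        rw [if_neg hBgt]
        have hoe : ((o0 :: ot).dropLast).Perm (opp.erase m0) := by
          have h1 := (pv_perm_erase_getLast (o0 :: ot) hneS).symm
          rw [← hM] at h1
          exact h1.trans (hperm.erase m0)
        have hlen' : rest.length ≤ (opp.erase m0).length := by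
          rw [List.length_erase_of_mem hm0opp]; omega
        have hot' : ((o0 :: ot).dropLast).Pairwise (· ≤ ·) :=
          List.Pairwise.sublist (List.dropLast_sublist _) hos
        by_cases hdraw : temp = (pvFT temp opp (false, m0)).2
        · rw [if_pos hdraw]
          rw [PySem.List.remove?_eq_some_erase opp _ (by rw [htemp2]; exact hm0opp)]
          simp only []
          rw [PySem.List.slice_from_one]
          simp only [List.tail_cons]
          rw [pvMkD_draw]
          have hBdr : temp = (o0 :: ot).getLast hneS := (hdraw.trans htemp2).trans hM
          rw [if_pos hBdr]
          exact ih rest (opp.erase ((pvFT temp opp (false, m0)).2)) ((o0 :: ot).dropLast)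
            w (d + 1) l hrestlen hcs' (by rw [htemp2]; exact hoe) hot'
            (by rw [htemp2]; exact hlen')
        · rw [if_neg hdraw]
          rw [PySem.List.remove?_eq_some_erase opp _ (by rw [htemp2]; exact hm0opp)]
          simp only []
          rw [PySem.List.slice_from_one]
          simp only [List.tail_cons]
          rw [pvMkD_lose]
          have hBdr : ¬temp = (o0 :: ot).getLast hneS :=
            fun h => hdraw (h.trans (htemp2.trans hM).symm)
          rw [if_neg hBdr]
          exact ih rest (opp.erase ((pvFT temp opp (false, m0)).2)) ((o0 :: ot).dropLast)
            w d (l + 1) hrestlen hcs' (by rw [htemp2]; exact hoe) hot'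
            (by rw [htemp2]; exact hlen')

-- ===== VERDICT (by name: the statement is the Claim_ definition above) =====
theorem codewar_result_spec : Claim_equal_codewar_result := by
  unfold Claim_equal_codewar_result
  intro codewarrior opponent _ hpre
  unfold Spec_codewar_result
  simp only [codewar_result, codewar_result_alt]
  have hsp : (PySem.List.sorted codewarrior (fun x => x) false).Pairwise (· ≤ ·) := by
    simpa using PySem.List.sorted_pairwise codewarrior (fun x => x)
  have hmain := pv_loop_eq (PySem.List.sorted codewarrior (fun x => x) false).length
    (PySem.List.sorted codewarrior (fun x => x) false) opponent
    (PySem.List.sorted opponent (fun x => x) false) 0 0 0 rfl hsp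
    (PySem.List.sorted_perm opponent (fun x => x) false)
    (by simpa using PySem.List.sorted_pairwise opponent (fun x => x))
    (by rw [PySem.List.length_sorted]; exact hpre)
  rw [show PySem.Dict.ofList [("win", (0 : Int)), ("draw", 0), ("lose", 0)] = pvMkD 0 0 0 from rfl]
  rw [hmain]
  rw [pvMkD_getD_win, pvMkD_getD_lose]
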